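-- pv_equiv track=rewrite | github.com/NikLaz25/Training_1 | task_28.py | Keymaker
-- ===== SOURCE A (Python) =====
-- def Keymaker(k):
--     '''формируем список закрытых дверей - doors'''
--     doors = [1] * k
--
--     def step_doors(step, doors):
--         '''метод цикл для каждого шага'''
--         for i in range(k):
--             if (i + 1) % step == 0 and doors[i] == 0:
--                 doors[i] = 1
--             elif (i + 1) % step == 0 and doors[i] == 1:
--                 doors[i] = 0
--         return doors
--
--     '''цикл для каждого шага'''
--     for step in range(k+1)[2:]:
--         doors = step_doors(step, doors)
--
--     '''переводим список в строку'''
--     doors_str = ''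
--     for i in doors:
--         doors_str += f'{i}'
--
--     return doors_str
-- ===== SOURCE B (Python) =====
-- def Keymaker(k):
--     # Door n (1-based) is toggled once per divisor >= 2, so it ends open ('1')
--     # exactly when n has an odd divisor count, i.e. n is a perfect square.
--     bits = ['0'] * max(k, 0)
--     r = 1
--     while r * r <= k:
--         bits[r * r - 1] = '1'
--         r += 1
--     return ''.join(bits)
-- ===== Notes on version B (the rewrite author's own statement) =====
-- stated objective: faster
-- what changed: Replaces the O(k^2) toggle simulation (one pass over all k doors per step) by directly marking the perfect-square positions, since door n ends open iff n has an odd number of divisors, i.e. is a perfect square.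
import Mathlib
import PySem

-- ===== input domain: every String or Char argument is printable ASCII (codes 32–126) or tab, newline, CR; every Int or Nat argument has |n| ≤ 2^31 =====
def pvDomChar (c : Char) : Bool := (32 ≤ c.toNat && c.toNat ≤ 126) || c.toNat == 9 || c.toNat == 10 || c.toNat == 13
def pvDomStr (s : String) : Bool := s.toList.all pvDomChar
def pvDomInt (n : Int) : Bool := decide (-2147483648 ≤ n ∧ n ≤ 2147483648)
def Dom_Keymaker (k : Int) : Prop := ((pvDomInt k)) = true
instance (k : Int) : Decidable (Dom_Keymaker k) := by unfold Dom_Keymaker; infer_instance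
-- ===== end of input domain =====

-- B replaces A's O(k^2) door-toggling simulation by directly marking the perfect-square
-- positions (door n ends open iff n is a perfect square); objective: faster.

-- ===== PORT A =====
-- inner 'step_doors': one pass of 'for i in range(k)' toggling doors[i] when (i+1) % step == 0
def pvStepBody (step : Int) (doors : List Int) (i : Int) : List Int :=
  if PySem.Int.mod (i + 1) step == 0 && PySem.List.pyGetD doors i 0 == 0 then
    PySem.List.pySetD doors i 1
  else if PySem.Int.mod (i + 1) step == 0 && PySem.List.pyGetD doors i 0 == 1 then
    PySem.List.pySetD doors i 0
  else doors

def pvStepDoors (k step : Int) (doors : List Int) : List Int :=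
  (PySem.List.pyRange 0 k 1).foldl (pvStepBody step) doors

def Keymaker (k : Int) : String :=
  -- doors = [1] * k  (empty for k <= 0, exactly as in Python)
  let doors0 : List Int := List.replicate k.toNat 1
  -- for step in range(k+1)[2:]: doors = step_doors(step, doors)
  let doorsF :=
    (PySem.List.slice (PySem.List.pyRange 0 (k + 1) 1) (some 2) none).foldl
      (fun d step => pvStepDoors k step d) doors0
  -- doors_str += f'{i}'
  doorsF.foldl (fun s i => s ++ PySem.Int.toStr i) ""

-- ===== PORT B =====
-- while r * r <= k: bits[r*r - 1] = '1'; r += 1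
def pvAltLoop (kn r : Nat) (bits : List Char) : List Char :=
  if r * r ≤ kn then pvAltLoop kn (r + 1) (bits.set (r * r - 1) '1') else bits
termination_by kn + 1 - r
decreasing_by
  rename_i h
  rcases Nat.eq_zero_or_pos r with h0 | h0
  · omega
  · have : r ≤ r * r := Nat.le_mul_of_pos_left r h0
    omega

def Keymaker_alt (k : Int) : String :=
  -- bits = ['0'] * max(k, 0)
  let bits : List Char := List.replicate (max k 0).toNat '0'
  -- ''.join(bits)
  String.ofList (pvAltLoop k.toNat 1 bits)

-- ===== PRECONDITION & SPEC =====
def Spec_Keymaker (k : Int) (out : String) : Prop := out = Keymaker_alt k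
instance (k : Int) (out : String) : Decidable (Spec_Keymaker k out) := by unfold Spec_Keymaker; infer_instance

-- ===== CLAIM (what is proved, stated in full; the proofs are below) =====
def Claim_equal_Keymaker : Prop := ∀ (k : Int), Dom_Keymaker k → Spec_Keymaker k (Keymaker k)

-- ===== LEMMAS AND PROOFS =====

-- door values are always 0 or 1
def pvInv (ds : List Int) : Prop := ∀ v ∈ ds, v = 0 ∨ v = 1

-- toggle applied to door j by one step
def pvTog (step : Int) (j : Nat) (v : Int) : Int :=
  if PySem.Int.mod ((j : Int) + 1) step = 0 then 1 - v else v

theorem getD_set {α : Type} (l : List α) (i j : Nat) (v d : α) :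
    (l.set i v).getD j d = if i = j ∧ i < l.length then v else l.getD j d := by
  simp [List.getD_eq_getElem?_getD, List.getElem?_set]
  split_ifs <;> simp_all <;> omega

-- one application of the loop body, index-wise
theorem step_char (step : Int) (doors : List Int) (t : Nat) (hinv : pvInv doors) :
    (pvStepBody step doors (t : Int)).length = doors.length ∧
    pvInv (pvStepBody step doors (t : Int)) ∧
    ∀ j : Nat, (pvStepBody step doors (t : Int)).getD j 0 =
      if j = t ∧ j < doors.length then pvTog step j (doors.getD j 0) else doors.getD j 0 := by
  have hinv' : ∀ w : Int, w = 0 ∨ w = 1 → pvInv (doors.set t w) := by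
    intro w hw x hx
    rcases List.mem_or_eq_of_mem_set hx with h | h
    · exact hinv x h
    · subst h; exact hw
  have hv : doors.getD t 0 = 0 ∨ doors.getD t 0 = 1 := by
    rcases Nat.lt_or_ge t doors.length with h | h
    · have : doors.getD t 0 = doors[t] := List.getD_eq_getElem doors 0 h
      rw [this]; exact hinv _ (List.getElem_mem h)
    · left; exact List.getD_eq_default doors 0 (by omega)
  have key : ∀ w : Int, (∀ h : t < doors.length, w = pvTog step t (doors.getD t 0)) →
      ∀ j : Nat, (doors.set t w).getD j 0 =
        if j = t ∧ j < doors.length then pvTog step j (doors.getD j 0) else doors.getD j 0 := by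
    intro w hw j
    rw [getD_set]
    by_cases hj : j = t ∧ j < doors.length
    · obtain ⟨rfl, h2⟩ := hj
      rw [if_pos ⟨rfl, h2⟩, if_pos ⟨rfl, h2⟩]
      exact hw h2
    · have ht : ¬ (t = j ∧ t < doors.length) := fun ⟨h1, h2⟩ => hj ⟨h1.symm, h1 ▸ h2⟩
      rw [if_neg ht, if_neg hj]
  simp only [pvStepBody, PySem.List.pyGetD_natCast, PySem.List.pySetD_natCast]
  by_cases hm : PySem.Int.mod ((t : Int) + 1) step = 0
  · rcases hv with hv | hv
    · have hc1 : ((PySem.Int.mod ((t:Int) + 1) step == 0) && (doors.getD t 0 == 0)) = true := by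
        rw [hv]; simp [hm]
      rw [if_pos hc1]
      refine ⟨by simp, hinv' 1 (by norm_num), key 1 ?_⟩
      intro _; simp only [pvTog, if_pos hm]; rw [hv]; norm_num
    · have hc1 : ((PySem.Int.mod ((t:Int) + 1) step == 0) && (doors.getD t 0 == 0)) = false := by
        rw [hv]; simp
      have hc2 : ((PySem.Int.mod ((t:Int) + 1) step == 0) && (doors.getD t 0 == 1)) = true := by
        rw [hv]; simp [hm]
      rw [if_neg (by rw [hc1]; simp), if_pos hc2]
      refine ⟨by simp, hinv' 0 (by norm_num), key 0 ?_⟩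
      intro _; simp only [pvTog, if_pos hm]; rw [hv]; norm_num
  · have hc : (PySem.Int.mod ((t:Int) + 1) step == 0) = false := by simpa using hm
    rw [if_neg (by rw [hc]; simp), if_neg (by rw [hc]; simp)]
    refine ⟨rfl, hinv, fun j => ?_⟩
    by_cases hj : j = t ∧ j < doors.length
    · obtain ⟨rfl, h⟩ := hj
      rw [if_pos ⟨rfl, h⟩]
      simp only [pvTog, if_neg hm]
    · rw [if_neg hj]

-- one inner pass over a nodup list of (Nat) indices
theorem inner_char (step : Int) (idxs : List Nat) (doors : List Int)
    (hnd : idxs.Nodup) (hinv : pvInv doors) :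
    (idxs.foldl (fun d (t : Nat) => pvStepBody step d (t : Int)) doors).length = doors.length ∧
    pvInv (idxs.foldl (fun d (t : Nat) => pvStepBody step d (t : Int)) doors) ∧
    ∀ j : Nat,
      (idxs.foldl (fun d (t : Nat) => pvStepBody step d (t : Int)) doors).getD j 0 =
        if j ∈ idxs ∧ j < doors.length then pvTog step j (doors.getD j 0) else doors.getD j 0 := by
  induction idxs generalizing doors with
  | nil => exact ⟨rfl, hinv, fun j => by simp⟩
  | cons t rest ih =>
    obtain ⟨hlen1, hinv1, hget1⟩ := step_char step doors t hinv
    obtain ⟨hlenR, hinvR, hgetR⟩ := ih (pvStepBody step doors (t : Int)) (hnd.of_cons) hinv1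
    have htnotin : t ∉ rest := by
      have := List.nodup_cons.mp hnd; exact this.1
    refine ⟨by simp [List.foldl_cons]; rw [hlenR, hlen1], by simpa [List.foldl_cons] using hinvR, fun j => ?_⟩
    simp only [List.foldl_cons]
    rw [hgetR j, hget1 j]
    by_cases hjt : j = t
    · subst hjt
      have hjr : j ∉ rest := htnotin
      by_cases hjl : j < doors.length
      · simp [hjr, hjl, hlen1]
      · simp [hjr, hjl, hlen1]
    · by_cases hjr : j ∈ rest
      · by_cases hjl : j < doors.length
        · simp [hjr, hjl, hjt, hlen1]
        · simp [hjr, hjl, hjt, hlen1]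
      · simp [hjr, hjt]

-- the full steps loop: parity of the number of toggling steps decides the door
theorem outer_char (k : Int) (ss : List Int) (doors : List Int) (hinv : pvInv doors)
    (hlen : doors.length = k.toNat) :
    (ss.foldl (fun d s => pvStepDoors k s d) doors).length = k.toNat ∧
    pvInv (ss.foldl (fun d s => pvStepDoors k s d) doors) ∧
    ∀ j : Nat, j < k.toNat →
      (ss.foldl (fun d s => pvStepDoors k s d) doors).getD j 0 =
        if Even (ss.countP (fun s => PySem.Int.mod ((j : Int) + 1) s == 0))
        then doors.getD j 0 else 1 - doors.getD j 0 := by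
  have hrw : ∀ (s : Int) (d : List Int), pvStepDoors k s d =
      (List.range k.toNat).foldl (fun d (t : Nat) => pvStepBody s d (t : Int)) d := by
    intro s d
    unfold pvStepDoors
    rw [PySem.List.pyRange_one, List.foldl_map]
    simp
  induction ss generalizing doors with
  | nil => exact ⟨hlen, hinv, fun j hj => by simp⟩
  | cons s rest ih =>
    obtain ⟨hlen1, hinv1, hget1⟩ :=
      inner_char s (List.range k.toNat) doors (List.nodup_range) hinv
    rw [List.foldl_cons, hrw s doors] at *
    set doors1 := (List.range k.toNat).foldl (fun d (t : Nat) => pvStepBody s d (t : Int)) doors with hd1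
    obtain ⟨hlenR, hinvR, hgetR⟩ := ih doors1 hinv1 (by rw [hlen1, hlen])
    refine ⟨hlenR, hinvR, fun j hj => ?_⟩
    rw [hgetR j hj, hget1 j]
    have hjmem : j ∈ List.range k.toNat ∧ j < doors.length := by
      constructor
      · exact List.mem_range.mpr hj
      · omega
    rw [if_pos hjmem]
    rw [List.countP_cons]
    by_cases pb : (PySem.Int.mod ((j : Int) + 1) s == 0) = true
    · have hm : PySem.Int.mod ((j : Int) + 1) s = 0 := by simpa using pb
      simp only [pvTog, if_pos hm, pb, if_true]
      rcases Nat.even_or_odd (rest.countP (fun s => PySem.Int.mod ((j : Int) + 1) s == 0)) with he | ho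
      · have : ¬ Even (rest.countP (fun s => PySem.Int.mod ((j : Int) + 1) s == 0) + 1) := by
          simp [Nat.even_add_one, he]
        rw [if_pos he, if_neg this]
      · have h1 : ¬ Even (rest.countP (fun s => PySem.Int.mod ((j : Int) + 1) s == 0)) := by
          simpa [Nat.not_even_iff_odd] using ho
        have h2 : Even (rest.countP (fun s => PySem.Int.mod ((j : Int) + 1) s == 0) + 1) := by
          simpa [Nat.even_add_one] using h1
        rw [if_neg h1, if_pos h2]
        omega
    · have hm : ¬ PySem.Int.mod ((j : Int) + 1) s = 0 := by simpa using pb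
      have pb' : (PySem.Int.mod ((j : Int) + 1) s == 0) = false := by simpa using pb
      simp only [pvTog, if_neg hm, pb']; norm_num

-- number theory: a positive n ≤ K has an even number of divisors in [2..K] iff n is a square
theorem even_divcount_iff_sqrt (n K : Nat) (hn : 1 ≤ n) (hK : n ≤ K) :
    (Even ((List.range' 2 (K - 1)).countP (fun s => decide (s ∣ n))) ↔
      Nat.sqrt n * Nat.sqrt n = n) := by
  have hn0 : n ≠ 0 := by omega
  -- the counted steps are exactly the divisors of n other than 1
  have h1 : ((List.range' 2 (K - 1)).countP (fun s => decide (s ∣ n))) =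
      ((Finset.Ico 2 (K + 1)).filter (· ∣ n)).card := by
    rw [Nat.Ico_eq_range']
    have h : K + 1 - 2 = K - 1 := by omega
    rw [h]
    simp [Finset.filter, Finset.card, List.countP_eq_length_filter]
  have h2 : (Finset.Ico 2 (K + 1)).filter (· ∣ n) = n.divisors.erase 1 := by
    ext d
    simp only [Finset.mem_filter, Finset.mem_Ico, Finset.mem_erase, Nat.mem_divisors]
    constructor
    · rintro ⟨⟨h2d, _⟩, hdvd⟩
      exact ⟨by omega, hdvd, hn0⟩
    · rintro ⟨hne, hdvd, _⟩
      have hd0 : d ≠ 0 := by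
        rintro rfl
        exact hn0 (Nat.eq_zero_of_zero_dvd hdvd)
      have hdn : d ≤ n := Nat.le_of_dvd (by omega) hdvd
      exact ⟨⟨by omega, by omega⟩, hdvd⟩
  -- pair each divisor d with n / d; the pairing fixes exactly the square root
  set P := n.divisors.filter (fun d => d * d < n) with hP
  set Q := n.divisors.filter (fun d => n < d * d) with hQ
  set E := n.divisors.filter (fun d => d * d = n) with hE
  have hmem : ∀ d ∈ n.divisors, d ∣ n ∧ d ≠ 0 ∧ d * (n / d) = n := by
    intro d hd
    obtain ⟨hdvd, _⟩ := Nat.mem_divisors.mp hd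
    refine ⟨hdvd, ?_, Nat.mul_div_cancel' hdvd⟩
    rintro rfl
    exact hn0 (Nat.eq_zero_of_zero_dvd hdvd)
  have hPQ : P.card = Q.card := by
    apply Finset.card_bij' (i := fun d _ => n / d) (j := fun d _ => n / d)
    · intro d hd
      obtain ⟨hd', hlt⟩ := Finset.mem_filter.mp hd
      obtain ⟨hdvd, hd0, hmul⟩ := hmem d hd'
      have hdltnd : d < n / d := by
        have := Nat.lt_of_mul_lt_mul_left (a := d) (by omega : d * d < d * (n / d))
        exact this
      refine Finset.mem_filter.mpr ⟨Nat.mem_divisors.mpr ⟨Nat.div_dvd_of_dvd hdvd, hn0⟩, ?_⟩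
      calc n = d * (n / d) := hmul.symm
        _ < (n / d) * (n / d) := by
            have hnd0 : 0 < n / d := by omega
            exact Nat.mul_lt_mul_of_lt_of_le hdltnd (le_refl _) hnd0
    · intro d hd
      obtain ⟨hd', hlt⟩ := Finset.mem_filter.mp hd
      obtain ⟨hdvd, hd0, hmul⟩ := hmem d hd'
      have hndltd : n / d < d := by
        by_contra hc
        push_neg at hc
        have : d * d ≤ d * (n / d) := Nat.mul_le_mul_left d hc
        omega
      refine Finset.mem_filter.mpr ⟨Nat.mem_divisors.mpr ⟨Nat.div_dvd_of_dvd hdvd, hn0⟩, ?_⟩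
      calc (n / d) * (n / d) < (n / d) * d := by
            have hnd0 : 0 < n / d := by
              apply Nat.div_pos (Nat.le_of_dvd (by omega) hdvd) (by omega)
            exact Nat.mul_lt_mul_of_le_of_lt (le_refl _) hndltd hnd0
        _ = n := by rw [Nat.mul_comm]; exact hmul
    · intro d hd
      obtain ⟨hd', _⟩ := Finset.mem_filter.mp hd
      exact Nat.div_div_self (hmem d hd').1 hn0
    · intro d hd
      obtain ⟨hd', _⟩ := Finset.mem_filter.mp hd
      exact Nat.div_div_self (hmem d hd').1 hn0
  have hsplit : n.divisors.card = P.card + (E.card + Q.card) := by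
    rw [← Finset.filter_card_add_filter_neg_card_eq_card (s := n.divisors)
      (p := fun d => d * d < n)]
    congr 1
    rw [← Finset.filter_card_add_filter_neg_card_eq_card
      (s := n.divisors.filter (fun d => ¬ d * d < n)) (p := fun d => d * d = n)]
    congr 1
    · rw [hE, Finset.filter_filter]
      congr 1
      apply Finset.filter_congr
      intro d _
      constructor
      · rintro ⟨_, h⟩; exact h
      · intro h; exact ⟨by omega, h⟩
    · rw [hQ, Finset.filter_filter]
      congr 1
      apply Finset.filter_congr
      intro d _
      constructor
      · rintro ⟨h1, h2⟩; omega
      · intro h; exact ⟨by omega, by omega⟩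
  have hEcard : E.card = if Nat.sqrt n * Nat.sqrt n = n then 1 else 0 := by
    by_cases hsq : Nat.sqrt n * Nat.sqrt n = n
    · rw [if_pos hsq]
      have : E = {Nat.sqrt n} := by
        ext d
        simp only [hE, Finset.mem_filter, Finset.mem_singleton, Nat.mem_divisors]
        constructor
        · rintro ⟨_, hdd⟩
          have := Nat.sqrt_eq d
          rw [hdd] at this
          omega
        · rintro rfl
          exact ⟨⟨⟨Nat.sqrt n, hsq.symm⟩, hn0⟩, hsq⟩
      rw [this, Finset.card_singleton]
    · rw [if_neg hsq]
      rw [hE, Finset.card_eq_zero, Finset.filter_eq_empty_iff]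
      intro d _ hdd
      have := Nat.sqrt_eq d
      rw [hdd] at this
      rw [this] at hsq
      exact hsq hdd
  have hone : 1 ∈ n.divisors := Nat.one_mem_divisors.mpr hn0
  have hpos : 1 ≤ n.divisors.card := Finset.card_pos.mpr ⟨1, hone⟩
  rw [h1, h2, Finset.card_erase_of_mem hone]
  rw [Nat.even_iff]
  by_cases hsq : Nat.sqrt n * Nat.sqrt n = n
  · simp only [hsq, if_pos] at hEcard
    constructor
    · intro _; exact hsq
    · intro _; omega
  · simp only [hsq, if_neg, if_false] at hEcard
    constructor
    · intro hev
      exfalso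
      omega
    · intro h; exact absurd h hsq

-- does n have a square root ≥ r?
def pvHasSq (r n : Nat) : Bool := (List.range (n + 1)).any fun m => decide (r ≤ m) && decide (m * m = n)

-- B's loop characterised index-wise
theorem pvHasSq_iff (r n : Nat) : pvHasSq r n = true ↔ ∃ m, r ≤ m ∧ m * m = n := by
  simp only [pvHasSq, List.any_eq_true, List.mem_range, Bool.and_eq_true, decide_eq_true_eq]
  constructor
  · rintro ⟨m, _, hp⟩
    exact ⟨m, hp.1, hp.2⟩
  · rintro ⟨m, hm, hp⟩
    have hmn : m ≤ n := by
      rcases Nat.eq_zero_or_pos m with rfl | h0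
      · omega
      · calc m ≤ m * m := Nat.le_mul_of_pos_left m h0
          _ = n := hp
    exact ⟨m, by omega, hm, hp⟩

theorem alt_char (kn : Nat) (r : Nat) (bits : List Char) :
    (pvAltLoop kn r bits).length = bits.length ∧
    (1 ≤ r → ∀ j : Nat, j < kn → j < bits.length →
      (pvAltLoop kn r bits).getD j ' ' =
        if pvHasSq r (j + 1) then '1' else bits.getD j ' ') := by
  fun_induction pvAltLoop kn r bits with
  | case1 r bits h ih =>
    obtain ⟨ihlen, ihget⟩ := ih
    refine ⟨by rw [ihlen]; simp, fun hr j hj hjb => ?_⟩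
    have hrle : r ≤ r * r := Nat.le_mul_of_pos_left r hr
    rw [ihget (by omega) j hj (by simpa using hjb)]
    by_cases hjq : j + 1 = r * r
    · rw [if_pos ((pvHasSq_iff r (j + 1)).mpr ⟨r, le_refl r, hjq.symm⟩)]
      by_cases h2 : pvHasSq (r + 1) (j + 1) = true
      · rw [if_pos h2]
      · rw [if_neg h2, getD_set, if_pos ⟨by omega, by omega⟩]
    · by_cases hs : pvHasSq r (j + 1) = true
      · have hs' : pvHasSq (r + 1) (j + 1) = true := by
          obtain ⟨m, hm, hp⟩ := (pvHasSq_iff _ _).mp hs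
          have hmr : m ≠ r := fun e => hjq (by rw [← hp, e])
          exact (pvHasSq_iff _ _).mpr ⟨m, by omega, hp⟩
        rw [if_pos hs', if_pos hs]
      · have hs' : pvHasSq (r + 1) (j + 1) = false := by
          refine Bool.eq_false_iff.mpr fun ht => hs ?_
          obtain ⟨m, hm, hp⟩ := (pvHasSq_iff _ _).mp ht
          exact (pvHasSq_iff _ _).mpr ⟨m, by omega, hp⟩
        rw [if_neg (by rw [hs']; simp), if_neg hs, getD_set,
          if_neg (fun ⟨e, _⟩ => hjq (by omega))]
  | case2 r bits h =>
    refine ⟨rfl, fun hr j hj hjb => ?_⟩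
    have hfalse : pvHasSq r (j + 1) = false := by
      refine Bool.eq_false_iff.mpr fun ht => ?_
      obtain ⟨m, hm, hp⟩ := (pvHasSq_iff _ _).mp ht
      have : r * r ≤ m * m := Nat.mul_le_mul hm hm
      omega
    rw [if_neg (by rw [hfalse]; simp)]

-- the trailing string build
theorem str_fold (ds : List Int) (hinv : pvInv ds) : ∀ s : String,
    (ds.foldl (fun acc i => acc ++ PySem.Int.toStr i) s).toList =
      s.toList ++ ds.map (fun v => if v = 1 then '1' else '0') := by
  induction ds with
  | nil => intro s; simp
  | cons v rest ih =>
    intro s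
    have hv : v = 0 ∨ v = 1 := hinv v (by simp)
    have ihr := ih (fun x hx => hinv x (by simp [hx])) (s ++ PySem.Int.toStr v)
    rw [List.foldl_cons, ihr, String.toList_append, PySem.Int.toList_toStr]
    rcases hv with rfl | rfl <;>
      simp [show PySem.Int.toChars 0 = ['0'] by decide, show PySem.Int.toChars 1 = ['1'] by decide]

-- ===== VERDICT (by name: the statement is the Claim_ definition above) =====
theorem bool_mod_dvd (s j : Nat) :
    (PySem.Int.mod ((j : Int) + 1) (s : Int) == 0) = decide (s ∣ (j + 1)) := by
  have h : ((j : Int) + 1) = ((j + 1 : Nat) : Int) := by push_cast; ring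
  rw [Bool.eq_iff_iff]
  simp only [beq_iff_eq, decide_eq_true_eq, PySem.Int.mod_eq_zero_iff_dvd, h,
    Int.natCast_dvd_natCast]

theorem Keymaker_spec : Claim_equal_Keymaker := by
  intro k _
  show Keymaker k = Keymaker_alt k
  have hsteps : PySem.List.slice (PySem.List.pyRange 0 (k + 1) 1) (some 2) none =
      (List.range' 2 ((k + 1).toNat - 2)).map (fun t : Nat => (t : Int)) := by
    rw [PySem.List.slice_from _ (show (0:Int) ≤ 2 by norm_num), PySem.List.pyRange_one, ← List.map_drop,
      List.range_eq_range', List.drop_range']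
    norm_num
    rfl
  have hA : Keymaker k =
      (((List.range' 2 ((k + 1).toNat - 2)).map (fun t : Nat => (t : Int))).foldl
          (fun d step => pvStepDoors k step d) (List.replicate k.toNat 1)).foldl
        (fun s i => s ++ PySem.Int.toStr i) "" := by
    simp only [Keymaker, hsteps]
  have hmax : (max k 0).toNat = k.toNat := by omega
  have hB : Keymaker_alt k =
      String.ofList (pvAltLoop k.toNat 1 (List.replicate k.toNat '0')) := by
    simp only [Keymaker_alt, hmax]
  obtain ⟨hlenF, hinvF, hgetF⟩ :=
    outer_char k ((List.range' 2 ((k + 1).toNat - 2)).map (fun t : Nat => (t : Int)))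
      (List.replicate k.toNat 1)
      (fun v hv => Or.inr (List.eq_of_mem_replicate hv))
      (List.length_replicate)
  set doorsF :=
    ((List.range' 2 ((k + 1).toNat - 2)).map (fun t : Nat => (t : Int))).foldl
      (fun d step => pvStepDoors k step d) (List.replicate k.toNat 1) with hdF
  obtain ⟨haltlen, haltget⟩ := alt_char k.toNat 1 (List.replicate k.toNat '0')
  apply String.toList_inj.mp
  rw [hA, hB, str_fold doorsF hinvF "", String.toList_ofList]
  rw [String.toList_ofList]
  simp only [List.nil_append]
  have hlen2 : (pvAltLoop k.toNat 1 (List.replicate k.toNat '0')).length = k.toNat := by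
    rw [haltlen, List.length_replicate]
  apply List.ext_getElem
  · simp [hlenF, hlen2]
  · intro j h1 h2
    have hj : j < k.toNat := by
      simpa [hlenF] using h1
    have hk1 : 1 ≤ k := by omega
    -- A's entry
    have hmapj : (List.map (fun v => if v = 1 then '1' else '0') doorsF)[j]'h1 =
        (if doorsF.getD j 0 = 1 then '1' else '0') := by
      rw [List.getElem_map]
      congr 1
      rw [List.getD_eq_getElem doorsF 0 (by omega : j < doorsF.length)]
    have hrepl : (List.replicate k.toNat (1 : Int)).getD j 0 = 1 := by
      rw [List.getD_eq_getElem _ 0 (by simpa using hj), List.getElem_replicate]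
    have hcount : ((List.range' 2 ((k + 1).toNat - 2)).map (fun t : Nat => (t : Int))).countP
        (fun s => PySem.Int.mod ((j : Int) + 1) s == 0) =
        (List.range' 2 (k.toNat - 1)).countP (fun s => decide (s ∣ (j + 1))) := by
      rw [List.countP_map]
      have hm : (k + 1).toNat - 2 = k.toNat - 1 := by omega
      rw [hm]
      exact List.countP_congr (fun t _ => by simp only [Function.comp_apply, bool_mod_dvd])
    have hAj := hgetF j hj
    rw [hcount, hrepl] at hAj
    -- B's entry
    have hBj := haltget (le_refl 1) j hj (by simpa using hj)
    have hrepl0 : (List.replicate k.toNat '0').getD j ' ' = '0' := by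
      rw [List.getD_eq_getElem _ ' ' (by simpa using hj), List.getElem_replicate]
    rw [hrepl0] at hBj
    have hsq : pvHasSq 1 (j + 1) = true ↔ Nat.sqrt (j + 1) * Nat.sqrt (j + 1) = j + 1 := by
      rw [pvHasSq_iff]
      constructor
      · rintro ⟨m, _, hp⟩
        have := Nat.sqrt_eq m
        rw [hp] at this
        rw [this]
        exact hp
      · intro h
        refine ⟨Nat.sqrt (j + 1), ?_, h⟩
        have : 0 < Nat.sqrt (j + 1) := Nat.sqrt_pos.mpr (by omega)
        omega
    have hnt := even_divcount_iff_sqrt (j + 1) k.toNat (by omega) (by omega)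
    rw [hmapj, ← List.getD_eq_getElem (pvAltLoop k.toNat 1 (List.replicate k.toNat '0')) ' '
      (lt_of_lt_of_eq hj hlen2.symm), hBj, hAj]
    by_cases he : Even ((List.range' 2 (k.toNat - 1)).countP (fun s => decide (s ∣ (j + 1))))
    · rw [if_pos he, if_pos (hsq.mpr (hnt.mp he))]
      norm_num
    · rw [if_neg he, if_neg (fun ht => he (hnt.mpr (hsq.mp ht)))]
      norm_num
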